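-- pv_equiv track=rewrite | github.com/jhonxlbb/PYTHOM-aulas | bancada/codigo.py | verificar_positivos_negativos
-- ===== SOURCE A (Python) =====
-- def verificar_positivos_negativos(lista_numero):
--     contador_positivo = 0
--     contador_negativo = 0
--     for numero in lista_numero:
--         if numero > 0:
--             contador_positivo += 1
--         else:
--             contador_negativo += 1
--     return contador_positivo, contador_negativo
-- ===== SOURCE B (Python) =====
-- def verificar_positivos_negativos(lista_numero):
--     # Different algorithm: sort, then binary-search the boundary between
--     # non-positives and positives; lo = number of non-positive elements.
--     ordenada = sorted(lista_numero)
--     lo, hi = 0, len(ordenada)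
--     while lo < hi:
--         meio = (lo + hi) // 2
--         if ordenada[meio] > 0:
--             hi = meio
--         else:
--             lo = meio + 1
--     return len(ordenada) - lo, lo
-- ===== Notes on version B (the rewrite author's own statement) =====
-- stated objective: alternative
-- what changed: Instead of a counting loop, B sorts the list and binary-searches the boundary index between non-positive and positive elements; that index is the non-positive count and length minus it the positive count.
import Mathlib
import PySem

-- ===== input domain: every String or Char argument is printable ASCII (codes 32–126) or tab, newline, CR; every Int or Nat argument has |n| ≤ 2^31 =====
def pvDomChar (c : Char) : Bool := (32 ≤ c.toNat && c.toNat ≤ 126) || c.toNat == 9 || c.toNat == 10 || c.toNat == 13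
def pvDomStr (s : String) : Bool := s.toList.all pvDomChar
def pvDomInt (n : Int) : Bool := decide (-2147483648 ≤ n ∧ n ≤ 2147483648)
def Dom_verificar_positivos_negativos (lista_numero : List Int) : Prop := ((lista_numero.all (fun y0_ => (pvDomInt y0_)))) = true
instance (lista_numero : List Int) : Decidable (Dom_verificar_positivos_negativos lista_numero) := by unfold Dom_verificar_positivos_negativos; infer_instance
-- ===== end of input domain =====

-- B replaces the counting loop by sort + binary search for the non-positive/positive boundary (alternative algorithm, not faster).


-- ===== PORT A =====
def verificar_positivos_negativos (lista_numero : List Int) : Int × Int :=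
  let r := lista_numero.foldl
    (fun (acc : Int × Int) numero =>
      if numero > 0 then (acc.1 + 1, acc.2) else (acc.1, acc.2 + 1))
    (0, 0)
  (r.1, r.2)

-- ===== PORT B =====
-- B's while-loop: binary search on the sorted list for the first index holding a
-- positive element.  lo/hi/meio are always in [0, length], so the index read
-- 'ordenada[meio]' is always in range; getD's default 0 is never returned.
def pvBusca (s : List Int) (lo hi : Nat) : Nat :=
  if h : lo < hi then
    let meio := (lo + hi) / 2
    if s.getD meio 0 > 0 then pvBusca s lo meio else pvBusca s (meio + 1) hi
  else lo
termination_by hi - lo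
decreasing_by all_goals omega

def verificar_positivos_negativos_alt (lista_numero : List Int) : Int × Int :=
  let ordenada := PySem.List.sorted lista_numero (fun x => x) false
  let lo := pvBusca ordenada 0 ordenada.length
  ((ordenada.length : Int) - (lo : Int), (lo : Int))

-- ===== PRECONDITION & SPEC =====
def Spec_verificar_positivos_negativos (lista_numero : List Int) (out : Int × Int) : Prop := out = verificar_positivos_negativos_alt lista_numero
instance (lista_numero : List Int) (out : Int × Int) : Decidable (Spec_verificar_positivos_negativos lista_numero out) := by unfold Spec_verificar_positivos_negativos; infer_instance

-- ===== CLAIM (what is proved, stated in full; the proofs are below) =====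
def Claim_equal_verificar_positivos_negativos : Prop := ∀ (lista_numero : List Int), Dom_verificar_positivos_negativos lista_numero → Spec_verificar_positivos_negativos lista_numero (verificar_positivos_negativos lista_numero)

-- ===== LEMMAS AND PROOFS =====

-- A's fold computes (count of positives, count of non-positives).
lemma pv_foldl_counts (lista : List Int) (p q : Int) :
    lista.foldl
      (fun (acc : Int × Int) numero =>
        if numero > 0 then (acc.1 + 1, acc.2) else (acc.1, acc.2 + 1))
      (p, q)
    = (p + (lista.countP (fun numero => numero > 0) : Nat),
       q + (lista.countP (fun numero => ¬ numero > 0) : Nat)) := by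
  induction lista generalizing p q with
  | nil => simp
  | cons x xs ih =>
    by_cases hx : x > 0
    · simp [List.foldl_cons, hx, ih]; ring_nf
    · have hx' : x ≤ 0 := Int.not_lt.mp hx
      simp [List.foldl_cons, hx, ih, hx']
      ring_nf

-- Binary-search invariant: if everything left of k is ≤ 0 and everything from k on
-- is > 0, and k lies in [lo, hi] ⊆ [0, length], the search returns k.
lemma pvBusca_inv (s : List Int) (k : Nat)
    (hle : ∀ i (h : i < s.length), i < k → s[i] ≤ 0)
    (hgt : ∀ i (h : i < s.length), k ≤ i → 0 < s[i]) :
    ∀ lo hi, lo ≤ k → k ≤ hi → hi ≤ s.length → pvBusca s lo hi = k := by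
  intro lo hi
  induction hn : hi - lo using Nat.strong_induction_on generalizing lo hi with
  | _ n ih =>
    intro hlo hhi hlen
    unfold pvBusca
    by_cases h : lo < hi
    · have hm : (lo + hi) / 2 < s.length := by omega
      rw [dif_pos h]
      simp only [List.getD_eq_getElem?_getD, List.getElem?_eq_getElem hm, Option.getD_some]
      by_cases hpos : s[(lo + hi) / 2] > 0
      · rw [if_pos hpos]
        have hk : k ≤ (lo + hi) / 2 := by
          by_contra hc
          exact absurd hpos (by simpa using Int.not_lt.mpr (hle _ hm (by omega)))
        exact ih ((lo + hi) / 2 - lo) (by omega) lo ((lo + hi) / 2) rfl hlo hk (by omega)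
      · rw [if_neg hpos]
        have hk : (lo + hi) / 2 < k := by
          by_contra hc
          exact hpos (hgt _ hm (by omega))
        exact ih (hi - ((lo + hi) / 2 + 1)) (by omega) ((lo + hi) / 2 + 1) hi rfl
          (by omega) hhi hlen
    · rw [dif_neg h]; omega

-- In a nondecreasing list, the non-positives are exactly the first
-- countP (· ≤ 0) positions.
lemma sorted_partition (s : List Int) (hs : s.Pairwise (· ≤ ·)) :
    ∀ i (h : i < s.length),
      (s[i] ≤ 0 ↔ i < s.countP (fun x => decide (x ≤ 0))) := by
  induction s with
  | nil => intro i h; simp at h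
  | cons x t ih =>
    intro i h
    rcases List.pairwise_cons.mp hs with ⟨hx, ht⟩
    by_cases hx0 : x ≤ 0
    · cases i with
      | zero => simpa [List.countP_cons, hx0] using Nat.succ_pos _
      | succ j =>
        have := ih ht j (by simpa using h)
        simpa [List.countP_cons, hx0, Nat.succ_lt_succ_iff] using this
    · have hzero : t.countP (fun x => decide (x ≤ 0)) = 0 := by
        rw [List.countP_eq_zero]
        intro y hy
        simpa using (by rw [Int.not_le] at hx0; exact lt_of_lt_of_le hx0 (hx y hy))
      cases i with
      | zero => simp [hx0, hzero]
      | succ j =>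
        have hj : j < t.length := by simpa using h
        have : (0:Int) < t[j] := by
          rw [Int.not_le] at hx0
          exact lt_of_lt_of_le hx0 (hx _ (t.getElem_mem hj))
        simp [hx0, hzero]
        omega

-- ===== VERDICT (by name: the statement is the Claim_ definition above) =====
theorem verificar_positivos_negativos_spec : Claim_equal_verificar_positivos_negativos := by
  intro lista _
  unfold Spec_verificar_positivos_negativos verificar_positivos_negativos
    verificar_positivos_negativos_alt
  set s := PySem.List.sorted lista (fun x => x) false with hsdef
  have hperm : s.Perm lista := PySem.List.sorted_perm lista (fun x => x) false
  have hpw : s.Pairwise (· ≤ ·) := by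
    simpa using PySem.List.sorted_pairwise lista (fun x => x)
  set k := s.countP (fun x => decide (x ≤ 0)) with hkdef
  have hpart := sorted_partition s hpw
  have hbusca : pvBusca s 0 s.length = k := by
    refine pvBusca_inv s k ?_ ?_ 0 s.length (Nat.zero_le _)
      List.countP_le_length le_rfl
    · intro i h hik; exact (hpart i h).mpr hik
    · intro i h hki
      by_contra hc
      exact absurd ((hpart i h).mp (by omega)) (by omega)
  have hcount : s.countP (fun x => decide (x ≤ 0))
      = lista.countP (fun numero => decide (¬ numero > 0)) := by
    rw [hperm.countP_eq]
    apply List.countP_congr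
    intro y _
    simp
  have hlen2 : lista.countP (fun numero => decide (numero > 0))
      + lista.countP (fun numero => decide (¬ numero > 0)) = lista.length := by
    simpa using (List.length_eq_countP_add_countP (l := lista)
      (p := fun numero => decide (numero > 0))).symm
  rw [pv_foldl_counts]
  have hlens : s.length = lista.length := hperm.length_eq
  simp only [hbusca, Prod.mk.injEq]
  refine ⟨by omega, by omega⟩
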